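-- pv_equiv track=rewrite | github.com/BBIYAC/CodingTest | Programmers/133502.py | solution
-- ===== SOURCE A (Python) =====
-- def solution(ingredient):
--     answer = 0
--     start = []
--     for i in ingredient:
--         start.append(i)
--         if start[-4:] == [1, 2, 3, 1]:
--             answer += 1
--             for i in range(4):
--                 start.pop()
--
--     return answer
-- ===== SOURCE B (Python) =====
-- def _find(lst):
--     for i in range(len(lst) - 3):
--         if lst[i:i+4] == [1, 2, 3, 1]:
--             return i
--     return None
--
-- def solution(ingredient):
--     lst = list(ingredient)
--     answer = 0
--     while True:
--         i = _find(lst)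
--         if i is None:
--             return answer
--         lst = lst[:i] + lst[i+4:]
--         answer += 1
-- ===== Notes on version B (the rewrite author's own statement) =====
-- stated objective: alternative
-- what changed: Replaces the incremental stack with a repeated-reduction pass: scan for the leftmost contiguous [1,2,3,1], delete it, count, and rescan until no occurrence remains (equal because the removal reduction is confluent).
import Mathlib
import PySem

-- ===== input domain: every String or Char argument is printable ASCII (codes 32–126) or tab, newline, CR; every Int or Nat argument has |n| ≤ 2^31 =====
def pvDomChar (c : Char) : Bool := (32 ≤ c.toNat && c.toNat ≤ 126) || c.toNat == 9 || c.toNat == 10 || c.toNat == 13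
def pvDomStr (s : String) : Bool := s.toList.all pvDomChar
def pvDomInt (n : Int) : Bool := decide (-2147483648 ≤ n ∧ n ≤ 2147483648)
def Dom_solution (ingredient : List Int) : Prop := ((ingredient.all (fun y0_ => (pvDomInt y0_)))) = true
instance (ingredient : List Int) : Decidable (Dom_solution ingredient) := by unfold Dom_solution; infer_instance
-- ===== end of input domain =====

-- B replaces A's one-pass stack with a repeated leftmost-occurrence deletion; alternative decomposition, not faster.

-- ===== PORT A =====
def solution (ingredient : List Int) : Int :=
  (ingredient.foldl
    (fun (st : Int × List Int) (i : Int) =>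
      let start := st.2 ++ [i]
      if PySem.List.slice start (some (-4)) none = [1, 2, 3, 1] then
        -- 'for i in range(4): start.pop()' — pop() removes the last element of a nonempty
        -- list; this branch is only reachable with start of length ≥ 4, where pop() = dropLast exactly
        (st.1 + 1, (PySem.List.pyRange 0 4 1).foldl (fun s _ => s.dropLast) start)
      else (st.1, start))
    ((0 : Int), ([] : List Int))).1

-- ===== PORT B =====
-- _find's scan: first index i with lst[i:i+4] == [1,2,3,1]
def pvFind (lst : List Int) (i : Nat) : Option Nat :=
  if i + 4 ≤ lst.length then
    if PySem.List.slice lst (some (i : Int)) (some ((i : Int) + (4 : Nat))) = [1, 2, 3, 1] then some i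
    else pvFind lst (i + 1)
  else none
termination_by lst.length - i

theorem pvFind_bound (lst : List Int) (k i : Nat) (h : pvFind lst k = some i) :
    i + 4 ≤ lst.length := by
  fun_induction pvFind lst k with
  | case1 k hle hsl => simp_all
  | case2 k hle hsl ih => exact ih h
  | case3 k hle => simp_all

theorem pv_remove_lt (lst : List Int) (i : Nat) (h : i + 4 ≤ lst.length) :
    (lst.take i ++ lst.drop (i + 4)).length < lst.length := by
  simp; omega

-- the while-loop of B
def pvLoop (lst : List Int) (answer : Int) : Int :=
  match h : pvFind lst 0 with
  | none => answer
  | some i => pvLoop (lst.take i ++ lst.drop (i + 4)) (answer + 1)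
termination_by lst.length
decreasing_by exact pv_remove_lt lst i (pvFind_bound lst 0 i h)

def solution_alt (ingredient : List Int) : Int := pvLoop ingredient 0

-- ===== PRECONDITION & SPEC =====
def Spec_solution (ingredient : List Int) (out : Int) : Prop := out = solution_alt ingredient
instance (ingredient : List Int) (out : Int) : Decidable (Spec_solution ingredient out) := by unfold Spec_solution; infer_instance

-- ===== CLAIM (what is proved, stated in full; the proofs are below) =====
def Claim_equal_solution : Prop := ∀ (ingredient : List Int), Dom_solution ingredient → Spec_solution ingredient (solution ingredient)

-- ===== LEMMAS AND PROOFS =====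
-- occAt lst i: lst[i:i+4] == [1,2,3,1]
def occAt (lst : List Int) (i : Nat) : Prop := (lst.drop i).take 4 = [1, 2, 3, 1]

def pvStep (st : Int × List Int) (i : Int) : Int × List Int :=
  let start := st.2 ++ [i]
  if PySem.List.slice start (some (-4)) none = [1, 2, 3, 1] then
    (st.1 + 1, (PySem.List.pyRange 0 4 1).foldl (fun s _ => s.dropLast) start)
  else (st.1, start)

theorem solution_eq_foldl (l : List Int) : solution l = (l.foldl pvStep (0, [])).1 := rfl

-- the stack test start[-4:] == [1,2,3,1]
theorem cond_iff (s : List Int) :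
    PySem.List.slice s (some (-4)) none = [1, 2, 3, 1] ↔ s.drop (s.length - 4) = [1, 2, 3, 1] := by
  rw [PySem.List.slice_from_neg_ofNat s 4 (by omega)]

theorem cond_occAt (s : List Int) (h : s.drop (s.length - 4) = [1, 2, 3, 1]) :
    4 ≤ s.length ∧ occAt s (s.length - 4) := by
  have hlen := congrArg List.length h
  simp at hlen
  refine ⟨by omega, ?_⟩
  unfold occAt
  rw [h]
  decide

theorem occAt_append_left (l₁ l₂ : List Int) (j : Nat) (h : j + 4 ≤ l₁.length) :
    occAt (l₁ ++ l₂) j ↔ occAt l₁ j := by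
  unfold occAt
  rw [List.drop_append_of_le_length (by omega),
      List.take_append_of_le_length (by simp; omega)]

theorem occAt_length (lst : List Int) (j : Nat) (h : occAt lst j) : j + 4 ≤ lst.length := by
  unfold occAt at h
  have := congrArg List.length h
  simp at this
  omega

-- the scanned slice lst[i:i+4] is (lst.drop i).take 4
theorem find_cond (lst : List Int) (k : Nat) :
    (PySem.List.slice lst (some (k : Int)) (some ((k : Int) + (4 : Nat))) = [1, 2, 3, 1])
      ↔ occAt lst k := by
  rw [PySem.List.slice_natCast_add]
  exact Iff.rfl

theorem pvFind_none (lst : List Int) (k : Nat) :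
    pvFind lst k = none → ∀ j, k ≤ j → ¬ occAt lst j := by
  fun_induction pvFind lst k with
  | case1 k hle hsl => simp
  | case2 k hle hsl ih =>
      intro hnone j hk hocc
      rcases Nat.eq_or_lt_of_le hk with rfl | hlt
      · exact hsl ((find_cond lst k).2 hocc)
      · exact ih hnone j (by omega) hocc
  | case3 k hle =>
      intro _ j hk hocc
      have := occAt_length lst j hocc
      omega

theorem pvFind_some (lst : List Int) (k i : Nat) :
    pvFind lst k = some i → occAt lst i ∧ ∀ j, k ≤ j → j < i → ¬ occAt lst j := by
  fun_induction pvFind lst k with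
  | case1 k hle hsl =>
      intro h
      obtain rfl : k = i := by simpa using h
      exact ⟨(find_cond lst k).1 hsl, fun j hk hj _ => absurd hj (by omega)⟩
  | case2 k hle hsl ih =>
      intro h
      obtain ⟨h1, h2⟩ := ih h
      refine ⟨h1, fun j hk hj hocc => ?_⟩
      rcases Nat.eq_or_lt_of_le hk with rfl | hlt
      · exact hsl ((find_cond lst k).2 hocc)
      · exact h2 j (by omega) hj hocc
  | case3 k hle => simp

-- running A's loop over an occurrence-free region pushes everything
theorem run_free (l : List Int) : ∀ (u : List Int) (a : Int),
    (∀ j, ¬ occAt (u ++ l) j) → l.foldl pvStep (a, u) = (a, u ++ l) := by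
  induction l with
  | nil => intro u a h; simp
  | cons x t ih =>
      intro u a h
      have hc : ¬ PySem.List.slice (u ++ [x]) (some (-4)) none = ([1, 2, 3, 1] : List Int) := by
        rw [cond_iff]
        intro hcond
        obtain ⟨hlen, hocc⟩ := cond_occAt _ hcond
        have hlift : occAt ((u ++ [x]) ++ t) ((u ++ [x]).length - 4) :=
          (occAt_append_left _ _ _ (by simp at hlen ⊢; omega)).2 hocc
        simp only [List.append_assoc, List.cons_append, List.nil_append] at hlift
        exact h _ hlift
      simp only [List.foldl_cons]
      rw [show pvStep (a, u) x = (a, u ++ [x]) from by simp [pvStep, hc]]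
      rw [ih (u ++ [x]) a (by
        intro j
        simpa only [List.append_assoc, List.cons_append, List.nil_append] using h j)]
      simp

-- running A's loop over the pattern at a leftmost occurrence removes it and counts one
theorem run_pat (u v : List Int) (a : Int)
    (hmin : ∀ j, j < u.length → ¬ occAt (u ++ [1, 2, 3, 1] ++ v) j) :
    ([1, 2, 3, 1] : List Int).foldl pvStep (a, u) = (a + 1, u) := by
  have lift : ∀ (p r : List Int), p ++ r = [1, 2, 3, 1] ++ v → p.length ≤ 3 →
      ¬ PySem.List.slice (u ++ p) (some (-4)) none = ([1, 2, 3, 1] : List Int) := by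
    intro p r hpr hp3
    rw [cond_iff]
    intro hcond
    obtain ⟨hlen, hocc⟩ := cond_occAt _ hcond
    have hlift : occAt ((u ++ p) ++ r) ((u ++ p).length - 4) :=
      (occAt_append_left _ _ _ (by simp at hlen ⊢; omega)).2 hocc
    rw [List.append_assoc, hpr, ← List.append_assoc] at hlift
    exact hmin _ (by simp at hlen ⊢; omega) hlift
  have h1 := lift [1] ([2, 3, 1] ++ v) (by simp) (by simp)
  have h2 := lift [1, 2] ([3, 1] ++ v) (by simp) (by simp)
  have h3 := lift [1, 2, 3] ([1] ++ v) (by simp) (by simp)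
  have h4 : PySem.List.slice (u ++ [1, 2, 3, 1]) (some (-4)) none = ([1, 2, 3, 1] : List Int) := by
    rw [cond_iff]
    have hl : (u ++ [1, 2, 3, 1]).length - 4 = u.length := by simp
    rw [hl]
    exact List.drop_left
  have hr : PySem.List.pyRange 0 4 1 = [0, 1, 2, 3] := by decide
  have hpop : ((u ++ [1, 2, 3, 1]).dropLast.dropLast.dropLast.dropLast : List Int) = u := by
    simp
  simp only [List.foldl_cons, List.foldl_nil]
  rw [show pvStep (a, u) 1 = (a, u ++ [1]) from by simp [pvStep, h1]]
  rw [show pvStep (a, u ++ [1]) 2 = (a, u ++ [1, 2]) from by simp [pvStep, h2]]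
  rw [show pvStep (a, u ++ [1, 2]) 3 = (a, u ++ [1, 2, 3]) from by simp [pvStep, h3]]
  have : pvStep (a, u ++ [1, 2, 3]) 1 = (a + 1, u) := by
    simp [pvStep, h4, hr]
  exact this

theorem run_add (v : List Int) : ∀ (u : List Int) (a : Int),
    v.foldl pvStep (a, u) = (a + (v.foldl pvStep (0, u)).1, (v.foldl pvStep (0, u)).2) := by
  induction v with
  | nil => simp
  | cons x t ih =>
      intro u a
      simp only [List.foldl_cons]
      by_cases hc : PySem.List.slice (u ++ [x]) (some (-4)) none = ([1, 2, 3, 1] : List Int)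
      · rw [show pvStep (a, u) x = (a + 1, (PySem.List.pyRange 0 4 1).foldl (fun s _ => s.dropLast) (u ++ [x])) from by simp [pvStep, hc],
            show pvStep (0, u) x = (0 + 1, (PySem.List.pyRange 0 4 1).foldl (fun s _ => s.dropLast) (u ++ [x])) from by simp [pvStep, hc]]
        rw [ih _ (a + 1), ih _ (0 + 1)]
        refine Prod.ext ?_ rfl
        simp
        ring
      · rw [show pvStep (a, u) x = (a, u ++ [x]) from by simp [pvStep, hc],
            show pvStep (0, u) x = (0, u ++ [x]) from by simp [pvStep, hc]]
        exact ih (u ++ [x]) a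

theorem pvLoop_eq_none (lst : List Int) (a : Int) (hf : pvFind lst 0 = none) :
    pvLoop lst a = a := by
  rw [pvLoop.eq_def]
  split <;> simp_all

theorem pvLoop_eq_some (lst : List Int) (a : Int) (i : Nat) (hf : pvFind lst 0 = some i) :
    pvLoop lst a = pvLoop (lst.take i ++ lst.drop (i + 4)) (a + 1) := by
  rw [pvLoop.eq_def]
  split <;> simp_all

theorem pvLoop_add (lst : List Int) (a : Int) : pvLoop lst a = a + pvLoop lst 0 := by
  cases hf : pvFind lst 0 with
  | none => rw [pvLoop_eq_none lst a hf, pvLoop_eq_none lst 0 hf]; ring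
  | some i =>
      rw [pvLoop_eq_some lst a i hf, pvLoop_eq_some lst 0 i hf,
          pvLoop_add (lst.take i ++ lst.drop (i + 4)) (a + 1),
          pvLoop_add (lst.take i ++ lst.drop (i + 4)) (0 + 1)]
      ring
termination_by lst.length
decreasing_by all_goals exact pv_remove_lt lst i (pvFind_bound lst 0 i hf)

theorem main_eq (l : List Int) : solution l = solution_alt l := by
  cases hf : pvFind l 0 with
  | none =>
      have hfree : ∀ j, ¬ occAt ([] ++ l) j := by
        intro j
        simpa using pvFind_none l 0 hf j (Nat.zero_le j)
      rw [solution_eq_foldl, run_free l [] 0 hfree]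
      unfold solution_alt
      rw [pvLoop_eq_none l 0 hf]
  | some i =>
      have hb := pvFind_bound l 0 i hf
      obtain ⟨hocc, hmin0⟩ := pvFind_some l 0 i hf
      have hmin : ∀ j, j < i → ¬ occAt l j := fun j hj => hmin0 j (Nat.zero_le j) hj
      have hul : (l.take i).length = i := by simp; omega
      have hsplit : l.drop i = [1, 2, 3, 1] ++ l.drop (i + 4) := by
        conv_lhs => rw [← List.take_append_drop 4 (l.drop i)]
        rw [hocc, List.drop_drop, Nat.add_comm]
      have hdec : l = l.take i ++ [1, 2, 3, 1] ++ l.drop (i + 4) := by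
        conv_lhs => rw [← List.take_append_drop i l, hsplit]
        rw [List.append_assoc]
      have hufree : ∀ j, ¬ occAt ([] ++ l.take i) j := by
        intro j hj
        simp only [List.nil_append] at hj
        have hj4 := occAt_length _ j hj
        have hlift : occAt (l.take i ++ ([1, 2, 3, 1] ++ l.drop (i + 4))) j :=
          (occAt_append_left _ _ j hj4).2 hj
        rw [← List.append_assoc, ← hdec] at hlift
        exact hmin j (by omega) hlift
      have e1 : solution l = 1 + solution (l.take i ++ l.drop (i + 4)) := by
        have hmin' : ∀ j, j < (l.take i).length →
            ¬ occAt (l.take i ++ [1, 2, 3, 1] ++ l.drop (i + 4)) j := by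
          intro j hj
          rw [← hdec]
          exact hmin j (by omega)
        have hL : List.foldl pvStep ((0 : Int), ([] : List Int)) l
            = (0 + 1 + (List.foldl pvStep (0, l.take i) (l.drop (i + 4))).1,
               (List.foldl pvStep (0, l.take i) (l.drop (i + 4))).2) := by
          conv_lhs => rw [hdec]
          rw [List.foldl_append, List.foldl_append, run_free (l.take i) [] 0 hufree,
              List.nil_append, run_pat (l.take i) (l.drop (i + 4)) 0 hmin',
              run_add (l.drop (i + 4)) (l.take i) (0 + 1)]
        have hR : List.foldl pvStep ((0 : Int), ([] : List Int)) (l.take i ++ l.drop (i + 4))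
            = List.foldl pvStep (0, l.take i) (l.drop (i + 4)) := by
          rw [List.foldl_append, run_free (l.take i) [] 0 hufree, List.nil_append]
        rw [solution_eq_foldl, solution_eq_foldl, hL, hR]
        ring
      have e2 : solution_alt l = 1 + solution_alt (l.take i ++ l.drop (i + 4)) := by
        unfold solution_alt
        rw [pvLoop_eq_some l 0 i hf, pvLoop_add]
        ring
      rw [e1, e2, main_eq (l.take i ++ l.drop (i + 4))]
termination_by l.length
decreasing_by exact pv_remove_lt l i hb

-- ===== VERDICT (by name: the statement is the Claim_ definition above) =====
theorem solution_spec : Claim_equal_solution := by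
  intro l _
  unfold Spec_solution
  exact main_eq l
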